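-- pv_equiv track=rewrite | github.com/Brepani/Columnas-bot | main.py | medios_con_publicacion
-- ===== SOURCE A (Python) =====
-- from typing import Dict, List, Tuple, Set
--
-- def medios_con_publicacion(items: List[Dict]) -> List[str]:
--     vistos: Set[str] = set()
--     out: List[str] = []
--     for it in items:
--         m = it["medio"]
--         if not m:
--             continue
--         if m == "SIN MEDIO" and vistos:  # oculta SIN MEDIO si ya hay reales
--             continue
--         if m not in vistos:
--             vistos.add(m); out.append(m)
--     return out
-- ===== SOURCE B (Python) =====
-- from typing import Dict, List
--
-- def medios_con_publicacion(items: List[Dict]) -> List[str]: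
--     # Staged pipeline: collect all truthy medios, dedup keeping first
--     # occurrences via dict.fromkeys, then apply the SIN MEDIO rule as a
--     # separate corrective pass.
--     medios = [it["medio"] for it in items if it["medio"]]
--     ordered = list(dict.fromkeys(medios))
--     if "SIN MEDIO" in ordered and ordered[0] != "SIN MEDIO":
--         ordered.remove("SIN MEDIO")
--     return ordered
-- ===== Notes on version B (the rewrite author's own statement) =====
-- stated objective: alternative
-- what changed: Replaces A's single stateful loop (set + output list with an interleaved 'hide SIN MEDIO once vistos is non-empty' guard) by a staged pipeline: comprehension of the truthy medios, dict.fromkeys ordered dedup, then a separate corrective removal of SIN MEDIO when it is present but not first.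
import Mathlib
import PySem

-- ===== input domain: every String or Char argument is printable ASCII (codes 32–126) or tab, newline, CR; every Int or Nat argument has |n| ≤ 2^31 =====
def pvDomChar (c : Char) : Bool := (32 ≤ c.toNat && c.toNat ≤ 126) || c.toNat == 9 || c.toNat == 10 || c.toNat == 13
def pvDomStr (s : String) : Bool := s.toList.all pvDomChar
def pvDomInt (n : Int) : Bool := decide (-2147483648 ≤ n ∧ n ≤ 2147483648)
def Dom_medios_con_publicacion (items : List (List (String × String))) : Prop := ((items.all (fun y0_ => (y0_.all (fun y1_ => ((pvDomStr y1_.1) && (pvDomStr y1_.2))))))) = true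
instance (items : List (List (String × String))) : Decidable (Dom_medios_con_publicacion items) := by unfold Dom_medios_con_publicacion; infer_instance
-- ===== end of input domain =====

-- B replaces A's single stateful loop by a staged pipeline (collect truthy medios,
-- dict.fromkeys dedup, corrective SIN MEDIO removal); same cost. Equivalence is proved
-- on inputs where every item has the "medio" key (A raises KeyError otherwise).

-- ===== PORT A =====
def medios_con_publicacion (items : List (List (String × String))) : List String :=
  (items.foldl (fun (st : PySem.Set String × List String) it =>
      let m := ((PySem.Dict.mk it).get? "medio").getD ""   -- Pre_ guarantees the key is present
      if m = "" then st
      else if m = "SIN MEDIO" ∧ st.1 ≠ [] then st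
      else if m ∈ st.1 then st
      else (PySem.Set.add st.1 m, st.2 ++ [m]))
    (PySem.Set.empty, [])).2

-- ===== PORT B =====
def medios_con_publicacion_alt (items : List (List (String × String))) : List String :=
  let medios := (items.map (fun it => ((PySem.Dict.mk it).get? "medio").getD "")).filter (fun m => m ≠ "")
  let ordered := PySem.List.dedup medios
  if "SIN MEDIO" ∈ ordered ∧ ordered.head? ≠ some "SIN MEDIO" then
    (PySem.List.remove? ordered "SIN MEDIO").getD ordered
  else ordered

-- ===== PRECONDITION & SPEC =====
-- Pre_ excludes exactly the items lacking the key "medio", on which A raises KeyError.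
def Pre_medios_con_publicacion (items : List (List (String × String))) : Prop :=
  (items.all (fun it => (PySem.Dict.mk it).contains "medio")) = true
instance (items : List (List (String × String))) : Decidable (Pre_medios_con_publicacion items) := by unfold Pre_medios_con_publicacion; infer_instance
def pvWitness_medios_con_publicacion : (List (List (String × String))) :=
  [[("medio", "SIN MEDIO")], [("medio", "X")], [("medio", "")]]

def Spec_medios_con_publicacion (items : List (List (String × String))) (out : List String) : Prop := out = medios_con_publicacion_alt items
instance (items : List (List (String × String))) (out : List String) : Decidable (Spec_medios_con_publicacion items out) := by unfold Spec_medios_con_publicacion; infer_instance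

-- ===== CLAIM (what is proved, stated in full; the proofs are below) =====
def Claim_equal_medios_con_publicacion : Prop := ∀ (items : List (List (String × String))), Dom_medios_con_publicacion items → Pre_medios_con_publicacion items → Spec_medios_con_publicacion items (medios_con_publicacion items)

-- ===== LEMMAS AND PROOFS =====

-- the medio of one item, and one-list step functions for A's loop / B's dedup
def pvM (it : List (String × String)) : String := ((PySem.Dict.mk it).get? "medio").getD ""

def pvStepA (o : List String) (it : List (String × String)) : List String :=
  let m := pvM it
  if m = "" then o
  else if m = "SIN MEDIO" ∧ o ≠ [] then o
  else if m ∈ o then o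
  else o ++ [m]

def pvStepB (o : List String) (it : List (String × String)) : List String :=
  let m := pvM it
  if m = "" then o
  else if m ∈ o then o
  else o ++ [m]

theorem pvPairA (items : List (List (String × String))) (o : List String) :
    items.foldl (fun (st : PySem.Set String × List String) it =>
      let m := ((PySem.Dict.mk it).get? "medio").getD ""
      if m = "" then st
      else if m = "SIN MEDIO" ∧ st.1 ≠ [] then st
      else if m ∈ st.1 then st
      else (PySem.Set.add st.1 m, st.2 ++ [m])) (o, o)
    = (items.foldl pvStepA o, items.foldl pvStepA o) := by
  induction items generalizing o with
  | nil => rfl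
  | cons it rest ih =>
    simp only [List.foldl_cons]
    have hstep : (let m := ((PySem.Dict.mk it).get? "medio").getD ""
      if m = "" then ((o, o) : PySem.Set String × List String)
      else if m = "SIN MEDIO" ∧ o ≠ [] then (o, o)
      else if m ∈ o then (o, o)
      else (PySem.Set.add o m, o ++ [m])) = (pvStepA o it, pvStepA o it) := by
      simp only [pvStepA, pvM]
      split_ifs with h1 h2 h3 <;> simp_all [PySem.Set.add, PySem.Set.contains]
    rw [hstep, ih]

-- B's dedup of the filtered medios IS the fold of pvStepB over the items
theorem pvDedupB (items : List (List (String × String))) (o : List String) :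
    ((items.map (fun it => ((PySem.Dict.mk it).get? "medio").getD "")).filter
        (fun m => m ≠ "")).foldl PySem.Set.add o
    = items.foldl pvStepB o := by
  induction items generalizing o with
  | nil => rfl
  | cons it rest ih =>
    simp only [List.map_cons, List.filter_cons]
    by_cases hE : pvM it = ""
    · simp only [pvM] at hE
      simp only [hE]
      simpa [pvStepB, pvM, hE] using ih o
    · simp only [pvM] at hE
      have this1 : PySem.Set.add o (((PySem.Dict.mk it).get? "medio").getD "") = pvStepB o it := by
        simp only [pvStepB, pvM, if_neg hE]
        by_cases hmem : ((PySem.Dict.mk it).get? "medio").getD "" ∈ o <;>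
          simp_all [PySem.Set.add, PySem.Set.contains]
      have hdec : (decide (((PySem.Dict.mk it).get? "medio").getD "" ≠ "")) = true := by
        simpa using hE
      rw [if_pos hdec, List.foldl_cons, List.foldl_cons, this1, ih]

-- the relation between A's state and B's state
def pvR (a b : List String) : Prop :=
  (a = b ∧ ("SIN MEDIO" ∈ b → b.head? = some "SIN MEDIO")) ∨
  (∃ p s, p ≠ [] ∧ "SIN MEDIO" ∉ p ∧ "SIN MEDIO" ∉ s ∧
    b = p ++ "SIN MEDIO" :: s ∧ a = p ++ s)

theorem pvStepA_empty (o : List String) (it : List (String × String)) (h : pvM it = "") :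
    pvStepA o it = o := by simp [pvStepA, h]

theorem pvStepB_empty (o : List String) (it : List (String × String)) (h : pvM it = "") :
    pvStepB o it = o := by simp [pvStepB, h]

theorem pvStepA_skip (o : List String) (it : List (String × String))
    (hS : pvM it = "SIN MEDIO") (ho : o ≠ []) : pvStepA o it = o := by
  simp [pvStepA, hS, ho]

theorem pvStepA_go (o : List String) (it : List (String × String)) (hE : pvM it ≠ "")
    (hG : ¬(pvM it = "SIN MEDIO" ∧ o ≠ [])) :
    pvStepA o it = (if pvM it ∈ o then o else o ++ [pvM it]) := by
  simp only [pvStepA, if_neg hE, if_neg hG]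

theorem pvStepB_go (o : List String) (it : List (String × String)) (hE : pvM it ≠ "") :
    pvStepB o it = (if pvM it ∈ o then o else o ++ [pvM it]) := by
  simp only [pvStepB, if_neg hE]

theorem pvR_step (a b : List String) (it : List (String × String)) (h : pvR a b) :
    pvR (pvStepA a it) (pvStepB b it) := by
  rcases h with ⟨heq, hh⟩ | ⟨p, s, hp, hpm, hsm, hb, ha⟩
  · subst heq
    by_cases hE : pvM it = ""
    · rw [pvStepA_empty _ _ hE, pvStepB_empty _ _ hE]; exact Or.inl ⟨rfl, hh⟩
    · by_cases hS : pvM it = "SIN MEDIO"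
      · by_cases hb : a = []
        · subst hb
          rw [pvStepA_go _ _ hE (by simp), pvStepB_go _ _ hE]
          simp only [hS, List.not_mem_nil, if_false, List.nil_append]
          exact Or.inl ⟨by simp, by simp⟩
        · rw [pvStepA_skip _ _ hS hb, pvStepB_go _ _ hE]
          by_cases hmem : pvM it ∈ a
          · rw [if_pos hmem]; exact Or.inl ⟨rfl, hh⟩
          · rw [if_neg hmem]
            rw [hS] at hmem
            exact Or.inr ⟨a, [], hb, hmem, by simp, by simp [hS], by simp⟩
      · rw [pvStepA_go _ _ hE (fun hc => hS hc.1), pvStepB_go _ _ hE]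
        by_cases hmem : pvM it ∈ a
        · rw [if_pos hmem]; exact Or.inl ⟨rfl, hh⟩
        · rw [if_neg hmem]
          refine Or.inl ⟨rfl, ?_⟩
          intro hmm
          have hbm : "SIN MEDIO" ∈ a := by
            rcases List.mem_append.mp hmm with h | h
            · exact h
            · simp at h; exact absurd h.symm hS
          have hhd := hh hbm
          rcases a with _ | ⟨x, xs⟩
          · simp at hbm
          · simpa using hhd
  · subst hb; subst ha
    by_cases hE : pvM it = ""
    · rw [pvStepA_empty _ _ hE, pvStepB_empty _ _ hE]
      exact Or.inr ⟨p, s, hp, hpm, hsm, rfl, rfl⟩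
    · by_cases hS : pvM it = "SIN MEDIO"
      · have ha : (p ++ s : List String) ≠ [] := by simp [hp]
        have hmemb : pvM it ∈ p ++ "SIN MEDIO" :: s := by simp [hS]
        rw [pvStepA_skip _ _ hS ha, pvStepB_go _ _ hE, if_pos hmemb]
        exact Or.inr ⟨p, s, hp, hpm, hsm, rfl, rfl⟩
      · rw [pvStepA_go _ _ hE (fun hc => hS hc.1), pvStepB_go _ _ hE]
        by_cases hmem : pvM it ∈ p ++ s
        · have hmemb : pvM it ∈ p ++ "SIN MEDIO" :: s := by
            rcases List.mem_append.mp hmem with h | h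
            · exact List.mem_append.mpr (Or.inl h)
            · exact List.mem_append.mpr (Or.inr (List.mem_cons_of_mem _ h))
          rw [if_pos hmem, if_pos hmemb]
          exact Or.inr ⟨p, s, hp, hpm, hsm, rfl, rfl⟩
        · have hmemb : pvM it ∉ p ++ "SIN MEDIO" :: s := by
            intro h
            rcases List.mem_append.mp h with h | h
            · exact hmem (List.mem_append.mpr (Or.inl h))
            · rcases List.mem_cons.mp h with h | h
              · exact hS h
              · exact hmem (List.mem_append.mpr (Or.inr h))
          rw [if_neg hmem, if_neg hmemb]
          refine Or.inr ⟨p, s ++ [pvM it], hp, hpm, ?_, by simp, by simp⟩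
          simp [hsm]
          exact fun h => hS h.symm

theorem pvR_fold (items : List (List (String × String))) (a b : List String) (h : pvR a b) :
    pvR (items.foldl pvStepA a) (items.foldl pvStepB b) := by
  induction items generalizing a b with
  | nil => exact h
  | cons it rest ih => exact ih _ _ (pvR_step a b it h)

theorem pvR_final (a b : List String) (h : pvR a b) :
    a = (if "SIN MEDIO" ∈ b ∧ b.head? ≠ some "SIN MEDIO" then
          (PySem.List.remove? b "SIN MEDIO").getD b
        else b) := by
  rcases h with ⟨rfl, hh⟩ | ⟨p, s, hp, hpm, hsm, rfl, rfl⟩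
  · rw [if_neg]
    rintro ⟨h1, h2⟩
    exact h2 (hh h1)
  · have hmem : "SIN MEDIO" ∈ p ++ "SIN MEDIO" :: s := by simp
    have hhd : (p ++ "SIN MEDIO" :: s).head? ≠ some "SIN MEDIO" := by
      rcases p with _ | ⟨x, xs⟩
      · exact absurd rfl hp
      · simp only [List.cons_append, List.head?_cons, ne_eq, Option.some_inj]
        intro hx
        exact hpm (by simp [hx])
    rw [if_pos ⟨hmem, hhd⟩, PySem.List.remove?_eq_some_erase _ _ hmem]
    simp only [Option.getD_some]
    rw [List.erase_append_right _ hpm, List.erase_cons_head]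

-- ===== VERDICT (by name: the statement is the Claim_ definition above) =====
theorem medios_con_publicacion_spec : Claim_equal_medios_con_publicacion := by
  intro items _ _
  unfold Spec_medios_con_publicacion medios_con_publicacion medios_con_publicacion_alt
  have hA := pvPairA items []
  have hB := pvDedupB items []
  simp only [PySem.Set.empty] at hA ⊢
  rw [hA]
  simp only [PySem.List.dedup_eq_ofList, PySem.Set.ofList_eq_foldl]
  rw [hB]
  exact pvR_final _ _ (pvR_fold items [] [] (Or.inl ⟨rfl, by simp⟩))
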